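-- pv_equiv track=rewrite | github.com/k-harada/AtCoder | ARC/ARC146/B.py | solve
-- ===== SOURCE A (Python) =====
-- def solve(n, m, k, a_list):
--     res = 0
--     b_list = a_list.copy()
--     for i in range(30, -1, -1):
--         d_list = []
--         for b in b_list:
--             if (b >> i) & 1:
--                 d_list.append(0)
--             else:
--                 d_list.append((1 << i) - b % (1 << i))
--         e_list = list(sorted([b_list[j] + d_list[j] - a_list[j] for j in range(n)]))
--         if sum(e_list[:k]) <= m:
--             res += 1 << i
--             b_list = [b_list[j] + d_list[j] for j in range(n)]
--
--     return res
-- ===== SOURCE B (Python) =====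
-- def solve(n, m, k, a_list):
--     # Greedy over bits 30..0: fused single pass producing the rounded-up values
--     # directly, with the "sum of the k cheapest costs" found by quickselect-style
--     # three-way partitioning instead of sorting the whole cost list each bit.
--     res = 0
--     b_list = a_list[:n]
--     for i in range(30, -1, -1):
--         step = 1 << i
--         c_list = [b if (b >> i) & 1 else b + step - b % step for b in b_list]
--         costs = [c_list[j] - a_list[j] for j in range(n)]
--         if sum_k_smallest(costs, k) <= m:
--             res += step
--             b_list = c_list
--     return res
--
--
-- def sum_k_smallest(l, k):
--     """Sum of the k smallest elements of l (all of them if k >= len(l))."""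
--     s = 0
--     while k > 0:
--         if k >= len(l):
--             return s + sum(l)
--         p = l[len(l) // 2]
--         lt = [x for x in l if x < p]
--         if k <= len(lt):
--             l = lt
--             continue
--         eq = len(l) - len(lt) - len([x for x in l if x > p])
--         if k <= len(lt) + eq:
--             return s + sum(lt) + (k - len(lt)) * p
--         s += sum(lt) + eq * p
--         k -= len(lt) + eq
--         l = [x for x in l if x > p]
--     return s
-- ===== Notes on version B (the rewrite author's own statement) =====
-- stated objective: faster
-- what changed: B keeps the bit-greedy but fuses A's two per-bit passes into one list of rounded-up values and replaces A's per-bit full sort + prefix slice by a quickselect-style three-way partition that sums the k cheapest costs; Pre_ restricts to the natural domain: 0 <= k (A's e_list[:k] on a negative count is accidental Python slice semantics) and n <= len(a_list) (otherwise A raises IndexError).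
-- outside the precondition, e.g. on solve(2, 3, -1, [1, 2]): A returns 5, B returns 2147483647
import Mathlib
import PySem

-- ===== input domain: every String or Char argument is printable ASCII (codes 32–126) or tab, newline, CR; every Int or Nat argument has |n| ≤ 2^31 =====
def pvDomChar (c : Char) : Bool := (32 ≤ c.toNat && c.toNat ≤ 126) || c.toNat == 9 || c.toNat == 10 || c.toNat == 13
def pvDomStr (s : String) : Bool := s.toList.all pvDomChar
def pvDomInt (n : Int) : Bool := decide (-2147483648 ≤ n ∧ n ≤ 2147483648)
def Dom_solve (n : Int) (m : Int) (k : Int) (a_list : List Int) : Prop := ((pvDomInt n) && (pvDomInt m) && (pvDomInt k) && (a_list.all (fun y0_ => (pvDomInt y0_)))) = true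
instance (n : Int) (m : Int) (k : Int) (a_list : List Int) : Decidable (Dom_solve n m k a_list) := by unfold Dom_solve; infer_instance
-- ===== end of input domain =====

-- B keeps the bit-greedy but fuses A's two per-bit passes into one list of
-- rounded-up values and replaces A's per-bit full sort + prefix slice by a
-- quickselect-style three-way partition summing the k cheapest costs
-- (objective: faster — measured so in a timing run; equality proved on Pre_solve).

-- ===== PORT A =====
-- Python `i` runs over range(30,-1,-1), so 0 ≤ i: `.toNat` is exact for the shifts.
-- Python `b >> i`/`& 1`/`%` are >>> / PySem.Int.band / PySem.Int.mod (Python-exact).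
-- `b_list[j]`/`d_list[j]`/`a_list[j]` for j in range(n) is pyGetD with a junk
-- default: Pre_solve (n ≤ len a_list) guarantees j is in range, where Python
-- raises no IndexError.  The loop body is the helper stepA.
def stepA (n : Int) (m : Int) (k : Int) (a_list : List Int)
    (st : Int × List Int) (i : Int) : Int × List Int :=
  let res := st.1
  let b_list := st.2
  let d_list := b_list.foldl (fun (d : List Int) (b : Int) =>
    if PySem.Int.band (b >>> i.toNat) 1 ≠ 0 then d ++ [(0 : Int)]
    else d ++ [((1 : Int) <<< i.toNat) - PySem.Int.mod b ((1 : Int) <<< i.toNat)]) []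
  let e_list := PySem.List.sorted ((PySem.List.pyRange 0 n 1).map (fun j =>
    PySem.List.pyGetD b_list j 0 + PySem.List.pyGetD d_list j 0 - PySem.List.pyGetD a_list j 0))
    (fun x => x) false
  if (PySem.List.slice e_list none (some k)).sum ≤ m then
    (res + ((1 : Int) <<< i.toNat),
     (PySem.List.pyRange 0 n 1).map (fun j =>
       PySem.List.pyGetD b_list j 0 + PySem.List.pyGetD d_list j 0))
  else (res, b_list)

def solve (n : Int) (m : Int) (k : Int) (a_list : List Int) : Int :=
  ((PySem.List.pyRange 30 (-1) (-1)).foldl (stepA n m k a_list) (0, a_list)).1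

-- ===== PORT B =====
-- termination helper for sksLoop (cited by its decreasing_by)
theorem pvFilterLtLength (l : List Int) (p : Int) (f : Int → Bool) (hp : p ∈ l)
    (hf : f p = false) : (l.filter f).length < l.length := by
  rcases Nat.lt_or_ge (l.filter f).length l.length with h | h
  · exact h
  · have hall := (List.length_filter_eq_length_iff).mp
      (le_antisymm (List.length_filter_le _ _) h)
    have hc := hall p hp
    rw [hf] at hc; cases hc

-- length of an attached filter (the shape wf-recursion leaves for sksLoop)
theorem pvLenFilterAttach (l : List Int) (q : Int → Bool) :
    (List.filter (fun x : {x // x ∈ l} => q x.1) l.attach).unattach.length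
      = (List.filter q l).length := by
  rw [List.length_unattach, ← List.countP_eq_length_filter, ← List.countP_eq_length_filter]
  exact List.countP_attach (l := l) (p := q)

theorem pvLenFilterAttachLt (l : List Int) (q : Int → Bool) (p : Int) (hp : p ∈ l)
    (hq : q p = false) :
    (List.filter (fun x : {x // x ∈ l} => q x.1) l.attach).unattach.length < l.length := by
  rw [pvLenFilterAttach]
  exact pvFilterLtLength l p q hp hq

theorem pvGetDMem (l : List Int) (i : Nat) (h : i < l.length) : l.getD i 0 ∈ l := by
  rw [List.getD_eq_getElem _ _ h]; exact List.getElem_mem h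

-- sum_k_smallest's while-loop as tail recursion on (s, l, k).
-- `l[len(l) // 2]` is a nonnegative in-range index whenever it is reached
-- (0 < k < len l there), so plain `.getD` is exact for it.
def sksLoop (s : Int) (l : List Int) (k : Int) : Int :=
  if hk : 0 < k then
    if hlen : (l.length : Int) ≤ k then s + l.sum
    else
      let p := l.getD (l.length / 2) 0
      let lt := l.filter (fun x => decide (x < p))
      if k ≤ (lt.length : Int) then sksLoop s lt k
      else
        let eq : Int := (l.length : Int) - lt.length - (l.filter (fun x => decide (p < x))).length
        if k ≤ (lt.length : Int) + eq then s + lt.sum + (k - lt.length) * p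
        else sksLoop (s + lt.sum + eq * p) (l.filter (fun x => decide (p < x))) (k - lt.length - eq)
  else s
termination_by l.length
decreasing_by
  · exact pvLenFilterAttachLt l (fun y => decide (y < l.getD (l.length / 2) 0)) _
      (pvGetDMem l (l.length / 2) (by omega)) (by simp)
  · exact pvLenFilterAttachLt l (fun y => decide (l.getD (l.length / 2) 0 < y)) _
      (pvGetDMem l (l.length / 2) (by omega)) (by simp)

-- B's loop body: rounded-up values c_list in one pass, then quickselect sum.
def stepB (n : Int) (m : Int) (k : Int) (a_list : List Int)
    (st : Int × List Int) (i : Int) : Int × List Int :=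
  let res := st.1
  let b_list := st.2
  let step := (1 : Int) <<< i.toNat
  let c_list := b_list.map (fun (b : Int) =>
    if PySem.Int.band (b >>> i.toNat) 1 ≠ 0 then b
    else b + step - PySem.Int.mod b step)
  let costs := (PySem.List.pyRange 0 n 1).map (fun j =>
    PySem.List.pyGetD c_list j 0 - PySem.List.pyGetD a_list j 0)
  if sksLoop 0 costs k ≤ m then (res + step, c_list) else (res, b_list)

def solve_alt (n : Int) (m : Int) (k : Int) (a_list : List Int) : Int :=
  ((PySem.List.pyRange 30 (-1) (-1)).foldl (stepB n m k a_list)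
    (0, PySem.List.slice a_list none (some n))).1

-- ===== PRECONDITION & SPEC =====
-- Pre_solve restricts to the task's natural domain: it excludes n > len(a_list),
-- where A raises IndexError, and k < 0, a count on which A's e_list[:k] slice
-- behaviour is accidental (B's selection loop naturally selects nothing there).
def Pre_solve (n : Int) (m : Int) (k : Int) (a_list : List Int) : Prop :=
  0 ≤ k ∧ n ≤ (a_list.length : Int)
instance (n : Int) (m : Int) (k : Int) (a_list : List Int) : Decidable (Pre_solve n m k a_list) := by
  unfold Pre_solve; infer_instance

def pvWitness_solve : Int × Int × Int × List Int := (3, 5, 2, [1, 2, 3])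

def Spec_solve (n : Int) (m : Int) (k : Int) (a_list : List Int) (out : Int) : Prop := out = solve_alt n m k a_list
instance (n : Int) (m : Int) (k : Int) (a_list : List Int) (out : Int) : Decidable (Spec_solve n m k a_list out) := by unfold Spec_solve; infer_instance

-- ===== CLAIM (what is proved, stated in full; the proofs are below) =====
def Claim_equal_solve : Prop := ∀ (n : Int) (m : Int) (k : Int) (a_list : List Int), Dom_solve n m k a_list → Pre_solve n m k a_list → Spec_solve n m k a_list (solve n m k a_list)

-- ===== LEMMAS AND PROOFS =====

-- A's per-element displacement and B's per-element rounded value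
def gA (i b : Int) : Int :=
  if PySem.Int.band (b >>> i.toNat) 1 ≠ 0 then 0
  else ((1 : Int) <<< i.toNat) - PySem.Int.mod b ((1 : Int) <<< i.toNat)

def fB (i b : Int) : Int :=
  if PySem.Int.band (b >>> i.toNat) 1 ≠ 0 then b
  else b + ((1 : Int) <<< i.toNat) - PySem.Int.mod b ((1 : Int) <<< i.toNat)

theorem fB_eq (i b : Int) : b + gA i b = fB i b := by
  unfold gA fB; split <;> ring

theorem dlist_eq (i : Int) (bl : List Int) :
    bl.foldl (fun (d : List Int) (b : Int) =>
      if PySem.Int.band (b >>> i.toNat) 1 ≠ 0 then d ++ [(0 : Int)]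
      else d ++ [((1 : Int) <<< i.toNat) - PySem.Int.mod b ((1 : Int) <<< i.toNat)]) []
    = bl.map (gA i) := by
  rw [PySem.List.foldl_congr_mem bl _ (fun (d : List Int) b => d ++ [gA i b]) []
      (by intro acc x _; by_cases hb : PySem.Int.band (x >>> i.toNat) 1 ≠ 0 <;> simp [gA, hb]),
    PySem.List.foldl_append_singleton_eq_map]
  simp

-- sorted(L) splits as sorted(<p) ++ (all the copies of p) ++ sorted(>p)
theorem sorted_split (L : List Int) (p : Int) :
    PySem.List.sorted L (fun x => x) false =
      PySem.List.sorted (L.filter (fun x => decide (x < p))) (fun x => x) false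
        ++ (List.replicate (L.filter (fun x => x == p)).length p
        ++ PySem.List.sorted (L.filter (fun x => decide (p < x))) (fun x => x) false) := by
  have e1 : L.filter (fun x => x == p)
      = List.replicate (L.filter (fun x => x == p)).length p := by
    apply List.eq_replicate_length.mpr
    intro b hb
    have := (List.mem_filter.mp hb).2
    exact eq_of_beq this
  have e2 : (L.filter (fun x => !decide (x < p))).filter (fun x => x == p)
      = L.filter (fun x => x == p) := by
    rw [List.filter_filter]
    apply List.filter_congr
    intro x _
    by_cases hx : x = p <;> simp [hx]
  have e3 : (L.filter (fun x => !decide (x < p))).filter (fun x => !(x == p))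
      = L.filter (fun x => decide (p < x)) := by
    rw [List.filter_filter]
    apply List.filter_congr
    intro x _
    by_cases h2 : x = p
    · subst h2; simp
    · by_cases h1 : x < p
      · have h3 : ¬ p < x := by omega
        simp [h1, h3]
      · have h3 : p < x := by omega
        simp [h1, h2, h3]
  apply PySem.List.sorted_id_eq_of_perm_of_pairwise
  · -- permutation
    have hper2 : (L.filter (fun x => x == p) ++ L.filter (fun x => decide (p < x))).Perm
        (L.filter (fun x => !decide (x < p))) := by
      have hp := List.filter_append_perm (fun x => x == p) (L.filter (fun x => !decide (x < p)))
      rwa [e2, e3] at hp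
    have hper1 : (L.filter (fun x => decide (x < p)) ++ L.filter (fun x => !decide (x < p))).Perm L :=
      List.filter_append_perm _ L
    refine List.Perm.trans ?_ (List.Perm.trans ((List.Perm.append_left _ hper2)) hper1)
    refine List.Perm.append (PySem.List.sorted_perm _ _ _) (List.Perm.append ?_ (PySem.List.sorted_perm _ _ _))
    exact (List.Perm.of_eq e1.symm)
  · -- sortedness
    have hmlt : ∀ x ∈ PySem.List.sorted (L.filter (fun x => decide (x < p))) (fun x => x) false, x < p := by
      intro x hx
      rw [PySem.List.mem_sorted] at hx
      simpa using (List.mem_filter.mp hx).2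
    have hmgt : ∀ x ∈ PySem.List.sorted (L.filter (fun x => decide (p < x))) (fun x => x) false, p < x := by
      intro x hx
      rw [PySem.List.mem_sorted] at hx
      simpa using (List.mem_filter.mp hx).2
    rw [List.pairwise_append, List.pairwise_append]
    refine ⟨by simpa using PySem.List.sorted_pairwise (L.filter (fun x => decide (x < p))) (fun x => x),
      ⟨by simp [List.pairwise_replicate],
       by simpa using PySem.List.sorted_pairwise (L.filter (fun x => decide (p < x))) (fun x => x), ?_⟩, ?_⟩
    · intro a ha b hb
      have ha' := List.eq_of_mem_replicate ha
      have hb' := hmgt b hb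
      omega
    · intro a ha b hb
      have ha' := hmlt a ha
      rcases List.mem_append.mp hb with hb | hb
      · have := List.eq_of_mem_replicate hb; omega
      · have := hmgt b hb; omega

-- quickselect sum = sum of the first k of the sorted list
theorem sksLoop_eq (len : Nat) : ∀ (L : List Int), L.length = len → ∀ (k s : Int),
    sksLoop s L k = s + ((PySem.List.sorted L (fun x => x) false).take k.toNat).sum := by
  induction len using Nat.strong_induction_on with
  | _ len ih =>
  intro L hL k s
  subst hL
  rw [sksLoop]
  by_cases hk : 0 < k
  · rw [dif_pos hk]
    by_cases hbig : (L.length : Int) ≤ k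
    · rw [dif_pos hbig]
      have h1 : (PySem.List.sorted L (fun x => x) false).length ≤ k.toNat := by
        have h2 := (PySem.List.sorted_perm L (fun x => x) false).length_eq
        omega
      rw [List.take_of_length_le h1, (PySem.List.sorted_perm L (fun x => x) false).sum_eq]
    · rw [dif_neg hbig]
      simp only []
      have hPmem : L.getD (L.length / 2) 0 ∈ L := pvGetDMem L (L.length / 2) (by omega)
      have hsplit := sorted_split L (L.getD (L.length / 2) 0)
      have hlensum := congrArg List.length hsplit
      simp only [List.length_append, List.length_replicate, PySem.List.length_sorted] at hlensum
      set P := L.getD (L.length / 2) 0 with hPdef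
      set lt := List.filter (fun x => decide (x < P)) L with hltdef
      set gt := List.filter (fun x => decide (P < x)) L with hgtdef
      set eqs := List.filter (fun x => x == P) L with heqdef
      have hltlen : lt.length < L.length := pvFilterLtLength L P _ hPmem (by simp)
      have hgtlen : gt.length < L.length := pvFilterLtLength L P _ hPmem (by simp)
      have hSlt : (PySem.List.sorted lt (fun x => x) false).length = lt.length :=
        PySem.List.length_sorted lt (fun x => x) false
      by_cases h1 : k ≤ (lt.length : Int)
      · rw [if_pos h1, ih lt.length (by omega) lt rfl k s, hsplit, List.take_append]
        have ht0 : k.toNat - (PySem.List.sorted lt (fun x => x) false).length = 0 := by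
          rw [hSlt]; omega
        rw [ht0]
        simp
      · rw [if_neg h1]
        push Not at h1
        by_cases h2 : k ≤ (lt.length : Int) + ((L.length : Int) - (lt.length : Int) - (gt.length : Int))
        · rw [if_pos h2, hsplit, List.take_append, List.take_append]
          have hta : List.take k.toNat (PySem.List.sorted lt (fun x => x) false)
              = PySem.List.sorted lt (fun x => x) false :=
            List.take_of_length_le (by rw [hSlt]; omega)
          have htb : List.take (k.toNat - (PySem.List.sorted lt (fun x => x) false).length)
              (List.replicate eqs.length P) = List.replicate (k.toNat - lt.length) P := by
            rw [List.take_replicate, hSlt]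
            congr 1
            omega
          have htc : k.toNat - (PySem.List.sorted lt (fun x => x) false).length
              - (List.replicate eqs.length P).length = 0 := by
            rw [hSlt, List.length_replicate]; omega
          rw [hta, htb, htc, List.take_zero]
          have hsum : (PySem.List.sorted lt (fun x => x) false).sum = lt.sum :=
            (PySem.List.sorted_perm lt (fun x => x) false).sum_eq
          have hcast : ((k.toNat - lt.length : ℕ) : ℤ) = k - lt.length := by omega
          simp only [List.sum_append, List.sum_replicate, List.sum_nil, hsum, nsmul_eq_mul, hcast]
          ring
        · rw [if_neg h2,
            ih gt.length (by omega) gt rfl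
              (k - (lt.length : Int) - ((L.length : Int) - (lt.length : Int) - (gt.length : Int)))
              (s + lt.sum + ((L.length : Int) - (lt.length : Int) - (gt.length : Int)) * P),
            hsplit, List.take_append, List.take_append]
          push Not at h2
          have hta : List.take k.toNat (PySem.List.sorted lt (fun x => x) false)
              = PySem.List.sorted lt (fun x => x) false :=
            List.take_of_length_le (by rw [hSlt]; omega)
          have htb : List.take (k.toNat - (PySem.List.sorted lt (fun x => x) false).length)
              (List.replicate eqs.length P) = List.replicate eqs.length P :=
            List.take_of_length_le (by rw [hSlt, List.length_replicate]; omega)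
          have htc : (k - (lt.length : Int) - ((L.length : Int) - (lt.length : Int) - (gt.length : Int))).toNat
              = k.toNat - (PySem.List.sorted lt (fun x => x) false).length
                - (List.replicate eqs.length P).length := by
            rw [hSlt, List.length_replicate]; omega
          rw [hta, htb, htc]
          have hsum : (PySem.List.sorted lt (fun x => x) false).sum = lt.sum :=
            (PySem.List.sorted_perm lt (fun x => x) false).sum_eq
          have hcast : ((eqs.length : ℕ) : ℤ) = (L.length : Int) - (lt.length : Int) - (gt.length : Int) := by
            omega
          simp only [List.sum_append, List.sum_replicate, hsum, nsmul_eq_mul, hcast]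
          ring
  · rw [dif_neg hk]
    have hz : k.toNat = 0 := by omega
    simp [hz]

def InvAB (n : Int) (Ab Bb : List Int) : Prop :=
  n ≤ (Ab.length : Int) ∧ n ≤ (Bb.length : Int) ∧
  ∀ j : Int, 0 ≤ j → j < n → PySem.List.pyGetD Ab j 0 = PySem.List.pyGetD Bb j 0

theorem select_eq (C : List Int) (k : Int) (hk : 0 ≤ k) :
    (PySem.List.slice (PySem.List.sorted C (fun x => x) false) none (some k)).sum
      = sksLoop 0 C k := by
  rw [PySem.List.slice_to _ hk, sksLoop_eq C.length C rfl k 0, zero_add]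

theorem step_eq (n m k : Int) (a_list : List Int) (hk : 0 ≤ k) (i : Int)
    (res : Int) (Ab Bb : List Int) (h : InvAB n Ab Bb) :
    (stepA n m k a_list (res, Ab) i).1 = (stepB n m k a_list (res, Bb) i).1 ∧
    InvAB n (stepA n m k a_list (res, Ab) i).2 (stepB n m k a_list (res, Bb) i).2 := by
  obtain ⟨hA, hB, hpt⟩ := h
  have hval : ∀ j : Int, 0 ≤ j → j < n →
      PySem.List.pyGetD Ab j 0 + PySem.List.pyGetD (Ab.map (gA i)) j 0
        = PySem.List.pyGetD (Bb.map (fB i)) j 0 := by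
    intro j h0 hj
    rw [PySem.List.pyGetD_eq_getElem Ab 0 h0 (by omega),
        PySem.List.pyGetD_eq_getElem (Ab.map (gA i)) 0 h0 (by simpa using by omega),
        PySem.List.pyGetD_eq_getElem (Bb.map (fB i)) 0 h0 (by simpa using by omega)]
    have hab : Ab[j.toNat]'(by omega) = Bb[j.toNat]'(by omega) := by
      have hj2 := hpt j h0 hj
      rwa [PySem.List.pyGetD_eq_getElem Ab 0 h0 (by omega),
           PySem.List.pyGetD_eq_getElem Bb 0 h0 (by omega)] at hj2
    simp only [List.getElem_map, hab, fB_eq]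
  have hc : (fun (b : Int) =>
      if PySem.Int.band (b >>> i.toNat) 1 ≠ 0 then b
      else b + (1 : Int) <<< i.toNat - PySem.Int.mod b ((1 : Int) <<< i.toNat)) = fB i := by
    funext b; rfl
  have hcosts : (PySem.List.pyRange 0 n 1).map (fun j =>
      PySem.List.pyGetD Ab j 0 + PySem.List.pyGetD (Ab.map (gA i)) j 0
        - PySem.List.pyGetD a_list j 0)
      = (PySem.List.pyRange 0 n 1).map (fun j =>
      PySem.List.pyGetD (Bb.map (fB i)) j 0 - PySem.List.pyGetD a_list j 0) := by
    apply List.map_congr_left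
    intro j hj
    rw [PySem.List.mem_pyRange_one] at hj
    rw [hval j hj.1 hj.2]
  simp only [stepA, stepB]
  rw [dlist_eq, hc, hcosts, select_eq _ k hk]
  split_ifs with hcond
  · refine ⟨rfl, ?_, ?_, ?_⟩
    · simp only [List.length_map, PySem.List.length_pyRange_one]; omega
    · simpa using hB
    · intro j h0 hj
      rw [PySem.List.pyGetD_map_pyRange_of_nonneg _ n j 0 h0 hj, hval j h0 hj]
  · exact ⟨rfl, hA, hB, hpt⟩

theorem fold_eq (n m k : Int) (a_list : List Int) (hk : 0 ≤ k) :
    ∀ (bits : List Int) (res : Int) (Ab Bb : List Int), InvAB n Ab Bb →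
      (bits.foldl (stepA n m k a_list) (res, Ab)).1
        = (bits.foldl (stepB n m k a_list) (res, Bb)).1 := by
  intro bits
  induction bits with
  | nil => intro res Ab Bb _; rfl
  | cons i rest ih =>
    intro res Ab Bb h
    obtain ⟨h1, h2⟩ := step_eq n m k a_list hk i res Ab Bb h
    simp only [List.foldl_cons]
    calc (rest.foldl (stepA n m k a_list) (stepA n m k a_list (res, Ab) i)).1
        = (rest.foldl (stepA n m k a_list)
            ((stepA n m k a_list (res, Ab) i).1, (stepA n m k a_list (res, Ab) i).2)).1 := by rw [Prod.mk.eta]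
      _ = (rest.foldl (stepB n m k a_list)
            ((stepA n m k a_list (res, Ab) i).1, (stepB n m k a_list (res, Bb) i).2)).1 := ih _ _ _ h2
      _ = (rest.foldl (stepB n m k a_list) (stepB n m k a_list (res, Bb) i)).1 := by rw [h1, Prod.mk.eta]

theorem inv_init (n : Int) (a_list : List Int) (hn : n ≤ (a_list.length : Int)) :
    InvAB n a_list (PySem.List.slice a_list none (some n)) := by
  by_cases hn0 : 0 ≤ n
  · rw [PySem.List.slice_to a_list hn0]
    refine ⟨hn, by simp [List.length_take]; omega, ?_⟩
    intro j h0 hj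
    rw [PySem.List.pyGetD_eq_getElem _ 0 h0 (by omega),
        PySem.List.pyGetD_eq_getElem _ 0 h0 (by simp [List.length_take]; omega)]
    simp [List.getElem_take]
  · refine ⟨hn, by omega, ?_⟩
    intro j h0 hj; omega

-- ===== VERDICT (by name: the statement is the Claim_ definition above) =====
theorem solve_spec : Claim_equal_solve := by
  intro n m k a_list _ hpre
  unfold Spec_solve solve solve_alt
  exact fold_eq n m k a_list hpre.1 _ 0 _ _ (inv_init n a_list hpre.2)
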